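-- pv_equiv track=rewrite | github.com/Hack3rHan/Attack-Log-Analyzer | lib/match/sqli.py | sqli
-- ===== SOURCE A (Python) =====
-- def sqli(log_string):
--     sqli_list = ['\'', '"' , '%27', '(', ')','select', 'SELECT', 'xp_cmdshell', 'update', 'UPDATE',
--     'limit', 'LIMIT', 'order', 'ORDER', 'sleep', 'SLEEP', 'and', 'AND', 'or', 'OR', 'union','UNION',
--     'where', 'WHERE', 'waitfor', 'WAITFOR', 'if', 'IF', 'like', 'LIKE', 'from', 'FROM']
--     for keyword in sqli_list:
--         if keyword in log_string:
--             return True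
--     return False
-- ===== SOURCE B (Python) =====
-- def sqli(log_string):
--     # Multi-pattern matcher: build a trie of the keywords once, then walk the
--     # string once, following the trie from each starting position.
--     symbols = ["'", '"', '%27', '(', ')', 'xp_cmdshell']
--     words = ['select', 'update', 'limit', 'order', 'sleep', 'and', 'or',
--              'union', 'where', 'waitfor', 'if', 'like', 'from']
--     keywords = symbols + [v for w in words for v in (w, w.upper())]
--
--     root = {'terminal': False, 'kids': {}}
--     for kw in keywords:
--         node = root
--         for ch in kw:
--             node = node['kids'].setdefault(ch, {'terminal': False, 'kids': {}})
--         node['terminal'] = True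
--
--     s = log_string
--     n = len(s)
--     for i in range(n):
--         node = root
--         j = i
--         while True:
--             if node['terminal']:
--                 return True
--             if j == n:
--                 break
--             node = node['kids'].get(s[j])
--             if node is None:
--                 break
--             j += 1
--     return False
-- ===== Notes on version B (the rewrite author's own statement) =====
-- stated objective: alternative
-- what changed: Replaces A's keyword-by-keyword substring loop with a multi-pattern trie matcher: the keywords (lowercase word list plus generated uppercase variants) are inserted into a trie once, then the string is scanned once, walking the trie from each start position.
import Mathlib
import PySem

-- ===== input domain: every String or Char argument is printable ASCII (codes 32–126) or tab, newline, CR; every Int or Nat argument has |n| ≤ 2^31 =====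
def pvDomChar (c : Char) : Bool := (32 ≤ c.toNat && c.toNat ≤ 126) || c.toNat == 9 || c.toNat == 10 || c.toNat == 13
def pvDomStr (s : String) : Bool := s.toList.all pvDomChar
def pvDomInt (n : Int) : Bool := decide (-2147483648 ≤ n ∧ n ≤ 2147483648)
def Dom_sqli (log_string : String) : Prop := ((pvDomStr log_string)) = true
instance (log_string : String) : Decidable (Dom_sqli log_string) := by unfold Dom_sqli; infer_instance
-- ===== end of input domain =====

-- B replaces A's per-keyword substring loop by a trie-based multi-pattern matcher
-- (keywords inserted into a trie once, the string scanned once walking the trie).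

-- ===== PORT A =====
-- 'for keyword in sqli_list: if keyword in log_string: return True / return False'
def sqliLoopA (log_string : String) : List String → Bool
  | [] => false
  | keyword :: rest =>
    if PySem.Str.isIn keyword log_string then true else sqliLoopA log_string rest

def sqli (log_string : String) : Bool :=
  sqliLoopA log_string ["'", "\"", "%27", "(", ")", "select", "SELECT", "xp_cmdshell", "update", "UPDATE", "limit", "LIMIT", "order", "ORDER", "sleep", "SLEEP", "and", "AND", "or", "OR", "union", "UNION", "where", "WHERE", "waitfor", "WAITFOR", "if", "IF", "like", "LIKE", "from", "FROM"]

-- ===== PORT B =====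
-- Python's node = {'terminal': bool, 'kids': dict char -> node}; the child dict is the
-- explicit association list PvKids (a nested Dict Char PvTrie is not a legal inductive).
mutual
inductive PvTrie where
  | node : Bool → PvKids → PvTrie
inductive PvKids where
  | nil : PvKids
  | cons : Char → PvTrie → PvKids → PvKids
end

-- node['kids'].get(ch) (first match in insertion order)
def pvKidsFind : PvKids → Char → Option PvTrie
  | .nil, _ => none
  | .cons c' t rest, c => if c' = c then some t else pvKidsFind rest c

-- the 'for ch in kw: node = node['kids'].setdefault(ch, empty)' loop + final terminal mark
mutual
def pvTrieInsert : PvTrie → List Char → PvTrie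
  | .node _ kids, [] => .node true kids
  | .node b kids, c :: cs => .node b (pvKidsInsert kids c cs)
  termination_by _ cs => (cs.length, 0)
def pvKidsInsert : PvKids → Char → List Char → PvKids
  | .nil, c, cs => .cons c (pvTrieInsert (.node false .nil) cs) .nil
  | .cons c' t rest, c, cs =>
    if c' = c then .cons c' (pvTrieInsert t cs) rest
    else .cons c' t (pvKidsInsert rest c cs)
  termination_by k _ cs => (cs.length, 1 + sizeOf k)
end

-- the inner 'while True' walk from one start position
def pvScan : PvTrie → List Char → Bool
  | .node b _, [] => b
  | .node b kids, c :: cs =>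
    if b then true else
      match pvKidsFind kids c with
      | none => false
      | some t => pvScan t cs

def pvWordsB : List String :=
  ["select", "update", "limit", "order", "sleep", "and", "or",
   "union", "where", "waitfor", "if", "like", "from"]

def pvKeywordsB : List String :=
  ["'", "\"", "%27", "(", ")", "xp_cmdshell"] ++
  pvWordsB.flatMap (fun w => [w, PySem.Str.upper w])

def pvRootB : PvTrie :=
  pvKeywordsB.foldl (fun r kw => pvTrieInsert r kw.toList) (.node false .nil)

def sqli_alt (log_string : String) : Bool :=
  let s := log_string.toList
  (PySem.List.pyRange 0 s.length 1).any fun i => pvScan pvRootB (s.drop i.toNat)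

-- ===== PRECONDITION & SPEC =====
def Spec_sqli (log_string : String) (out : Bool) : Prop := out = sqli_alt log_string
instance (log_string : String) (out : Bool) : Decidable (Spec_sqli log_string out) := by unfold Spec_sqli; infer_instance

-- ===== CLAIM (what is proved, stated in full; the proofs are below) =====
def Claim_equal_sqli : Prop := ∀ (log_string : String), Dom_sqli log_string → Spec_sqli log_string (sqli log_string)

-- ===== LEMMAS AND PROOFS =====

theorem sqliLoopA_eq_any (log_string : String) (l : List String) :
    sqliLoopA log_string l = l.any fun k => PySem.Str.isIn k log_string := by
  induction l with
  | nil => rfl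
  | cons k rest ih => simp [sqliLoopA, ih]

theorem pvKidsFind_insert (kids : PvKids) (a c : Char) (w : List Char) :
    pvKidsFind (pvKidsInsert kids a w) c =
      if a = c then
        some (pvTrieInsert ((pvKidsFind kids a).getD (.node false .nil)) w)
      else pvKidsFind kids c :=
  match kids with
  | .nil => by
    by_cases h : a = c <;> simp [pvKidsInsert, pvKidsFind, h]
  | .cons c' t rest => by
    by_cases h1 : c' = a
    · subst h1
      by_cases h2 : c' = c <;> simp [pvKidsInsert, pvKidsFind, h2]
    · by_cases h2 : c' = c
      · subst h2
        have h1' : ¬ a = c' := fun h => h1 (Eq.symm h)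
        simp [pvKidsInsert, h1, pvKidsFind, h1']
      · simp [pvKidsInsert, h1, pvKidsFind, h2, pvKidsFind_insert rest a c w]

theorem pvScan_empty (cs : List Char) : pvScan (.node false .nil) cs = false := by
  cases cs <;> simp [pvScan, pvKidsFind]

theorem pvScan_insert (w : List Char) (b : Bool) (kids : PvKids) (cs : List Char) :
    pvScan (pvTrieInsert (.node b kids) w) cs = (decide (w <+: cs) || pvScan (.node b kids) cs) := by
  induction w generalizing b kids cs with
  | nil =>
    cases cs with
    | nil => simp [pvTrieInsert, pvScan]
    | cons c cs' => simp [pvTrieInsert, pvScan]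
  | cons a w' ih =>
    cases cs with
    | nil => simp [pvTrieInsert, pvScan]
    | cons c cs' =>
      simp only [pvTrieInsert, pvScan, pvKidsFind_insert]
      by_cases hb : b
      · simp [hb]
      · simp only [hb]
        by_cases hac : a = c
        · subst hac
          cases hf : pvKidsFind kids a with
          | none => simp [ih, pvScan_empty, List.cons_prefix_cons]
          | some t =>
            obtain ⟨b', kids'⟩ := t
            simp [ih, List.cons_prefix_cons]
        · have : ¬ (a :: w' <+: c :: cs') := by
            simp [List.cons_prefix_cons, hac]
          simp [hac, this]

theorem pvScan_foldl (l : List String) (t : PvTrie) (cs : List Char) :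
    pvScan (l.foldl (fun r kw => pvTrieInsert r kw.toList) t) cs =
      (l.any (fun kw => decide (kw.toList <+: cs)) || pvScan t cs) := by
  induction l generalizing t with
  | nil => simp
  | cons kw rest ih =>
    obtain ⟨b, kids⟩ := t
    simp [List.foldl_cons, ih, pvScan_insert, Bool.or_assoc, Bool.or_comm]

theorem pvScan_root (cs : List Char) :
    pvScan pvRootB cs = pvKeywordsB.any fun kw => decide (kw.toList <+: cs) := by
  rw [pvRootB, pvScan_foldl, pvScan_empty, Bool.or_false]

-- the two keyword lists contain the same strings
set_option maxHeartbeats 1000000 in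
theorem keywords_same (k : String) :
    (k ∈ ["'", "\"", "%27", "(", ")", "select", "SELECT", "xp_cmdshell", "update", "UPDATE", "limit", "LIMIT", "order", "ORDER", "sleep", "SLEEP", "and", "AND", "or", "OR", "union", "UNION", "where", "WHERE", "waitfor", "WAITFOR", "if", "IF", "like", "LIKE", "from", "FROM"]) ↔ k ∈ pvKeywordsB := by
  have h : pvKeywordsB = ["'", "\"", "%27", "(", ")", "xp_cmdshell", "select", "SELECT", "update", "UPDATE", "limit", "LIMIT", "order", "ORDER", "sleep", "SLEEP", "and", "AND", "or", "OR", "union", "UNION", "where", "WHERE", "waitfor", "WAITFOR", "if", "IF", "like", "LIKE", "from", "FROM"] := by rfl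
  rw [h]
  constructor <;> (intro hm; fin_cases hm <;> simp)

theorem keywordsA_nonempty (k : String)
    (hk : k ∈ ["'", "\"", "%27", "(", ")", "select", "SELECT", "xp_cmdshell", "update", "UPDATE", "limit", "LIMIT", "order", "ORDER", "sleep", "SLEEP", "and", "AND", "or", "OR", "union", "UNION", "where", "WHERE", "waitfor", "WAITFOR", "if", "IF", "like", "LIKE", "from", "FROM"]) :
    k.toList ≠ [] := by
  fin_cases hk <;> decide

-- ===== VERDICT (by name: the statement is the Claim_ definition above) =====
theorem sqli_spec : Claim_equal_sqli := by
  intro log_string _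
  unfold Spec_sqli sqli sqli_alt
  rw [sqliLoopA_eq_any]
  rw [Bool.eq_iff_iff]
  simp only [List.any_eq_true, PySem.Str.isIn_eq, PySem.List.mem_pyRange_one, pvScan_root,
    decide_eq_true_eq]
  constructor
  · rintro ⟨k, hk, hin⟩
    obtain ⟨j, hj⟩ := (PySem.Chars.exists_prefix_drop_iff_isIn _ _).mpr hin
    have hkne : k.toList ≠ [] := keywordsA_nonempty k hk
    have hjlt : j < log_string.toList.length := by
      by_contra hge
      rw [not_lt] at hge
      have : log_string.toList.drop j = [] := List.drop_eq_nil_of_le hge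
      exact hkne (List.prefix_nil.mp (this ▸ hj))
    exact ⟨(j : Int), ⟨Int.natCast_nonneg _, by exact_mod_cast hjlt⟩,
      k, (keywords_same k).mp hk, by rwa [Int.toNat_natCast]⟩
  · rintro ⟨i, _, k, hk, hpre⟩
    exact ⟨k, (keywords_same k).mpr hk,
      (PySem.Chars.exists_prefix_drop_iff_isIn _ _).mp ⟨i.toNat, hpre⟩⟩
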